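-- pv_equiv track=rewrite | github.com/BKHMSI/brain-language-suma | language-localization/utils.py | get_layer_names
-- ===== SOURCE A (Python) =====
-- def get_num_blocks(model_name, num_blocks):
--     if "susan-1" in model_name or "random" in model_name:
--         return 1
--     return {
--         "gpt2": 12,
--         "gpt2-medium": 24,
--         "gpt2-large": 32,
--         "gpt2-xl": 48,
--         "Llama-2-7b-hf": 32,
--         "Llama-2-13b-hf": 40,
--         "susan": num_blocks,
--         "susan-simple": 1,
--     }[model_name]
--
-- def get_layer_names(model_name, num_blocks=None):
--
--     if num_blocks is None:
--         num_blocks = get_num_blocks(model_name, num_blocks)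
--
--     if "gpt2" in model_name:
--         return [f'transformer.h.{block}.{layer_desc}'
--             for block in range(num_blocks)
--             for layer_desc in ['ln_1', 'attn', 'ln_2', 'mlp']
--         ]
--     elif "Llama-2" in model_name or model_name == "susan":
--         return [f'model.layers.{layer_num}.{layer_desc}'
--             for layer_num in range(num_blocks)
--             for layer_desc in ["input_layernorm", "self_attn", "post_attention_layernorm", "mlp"]
--         ]
--     elif model_name == "susan-1-ln-attn-p2":
--         return [f'lm_base.layers.{layer_num}.{layer_desc}' for layer_num in range(2) for layer_desc in ["input_layernorm", "self_attn", "post_attention_layernorm", "mlp"]]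
--     elif model_name == "susan-simple" or model_name == "susan-1-ln-attn" or model_name == "susan-1-l-attn" or model_name == "susan-1-ln-attn-pos":
--         return [f'layers.{layer_num}.{layer_desc}'
--             for layer_num in range(num_blocks)
--             for layer_desc in ["input_layernorm", "self_attn"]
--         ]
--     elif model_name == "susan-1-attn":
--         return [f'model.layers.{layer_num}.{layer_desc}'
--             for layer_num in range(num_blocks)
--             for layer_desc in ["self_attn"]
--         ]
--     elif model_name == "susan-1-mlp":
--         return [f'layers.{layer_num}.{layer_desc}'
--             for layer_num in range(num_blocks)
--             for layer_desc in ["mlp"]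
--         ]
--     elif model_name == "susan-1-ln-mlp":
--         return [f'layers.{layer_num}.{layer_desc}'
--             for layer_num in range(num_blocks)
--             for layer_desc in ["input_layernorm", "mlp"]
--         ]
--     elif model_name == "susan-1-ln-attn-ln-mlp" or model_name == "susan-1-pos-ln-attn-ln-mlp" or "susan-1" in model_name:
--         return [f'layers.{layer_num}.{layer_desc}'
--             for layer_num in range(num_blocks)
--             for layer_desc in ["input_layernorm", "self_attn", "post_attention_layernorm", "mlp"]
--         ]
--     elif "random" in model_name:
--         return ['linear']
--     else:
--         raise ValueError(f"{model_name} not supported currently!")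
-- ===== SOURCE B (Python) =====
-- LN4 = ["input_layernorm", "self_attn", "post_attention_layernorm", "mlp"]
--
-- def get_num_blocks(model_name, num_blocks):
--     if "susan-1" in model_name or "random" in model_name:
--         return 1
--     return {
--         "gpt2": 12,
--         "gpt2-medium": 24,
--         "gpt2-large": 32,
--         "gpt2-xl": 48,
--         "Llama-2-7b-hf": 32,
--         "Llama-2-13b-hf": 40,
--         "susan": num_blocks,
--         "susan-simple": 1,
--     }[model_name]
--
-- # exact-name table: model name -> (prefix, layer descs, fixed count or None for num_blocks)
-- _EXACT = {
--     "susan": ("model.layers.", LN4, None),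
--     "susan-1-ln-attn-p2": ("lm_base.layers.", LN4, 2),
--     "susan-simple": ("layers.", ["input_layernorm", "self_attn"], None),
--     "susan-1-ln-attn": ("layers.", ["input_layernorm", "self_attn"], None),
--     "susan-1-l-attn": ("layers.", ["input_layernorm", "self_attn"], None),
--     "susan-1-ln-attn-pos": ("layers.", ["input_layernorm", "self_attn"], None),
--     "susan-1-attn": ("model.layers.", ["self_attn"], None),
--     "susan-1-mlp": ("layers.", ["mlp"], None),
--     "susan-1-ln-mlp": ("layers.", ["input_layernorm", "mlp"], None),
--     "susan-1-ln-attn-ln-mlp": ("layers.", LN4, None),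
--     "susan-1-pos-ln-attn-ln-mlp": ("layers.", LN4, None),
-- }
--
-- def get_layer_names(model_name, num_blocks=None):
--     if num_blocks is None:
--         num_blocks = get_num_blocks(model_name, num_blocks)
--
--     if model_name in _EXACT:
--         prefix, descs, count = _EXACT[model_name]
--     elif "gpt2" in model_name:
--         prefix, descs, count = "transformer.h.", ["ln_1", "attn", "ln_2", "mlp"], None
--     elif "Llama-2" in model_name:
--         prefix, descs, count = "model.layers.", LN4, None
--     elif "susan-1" in model_name:
--         prefix, descs, count = "layers.", LN4, None
--     elif "random" in model_name:
--         return ["linear"]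
--     else:
--         raise ValueError(f"{model_name} not supported currently!")
--
--     if count is None:
--         count = num_blocks
--     # one flat loop over the flattened index: j // k picks the block, j % k the layer desc
--     k = len(descs)
--     return [f"{prefix}{j // k}.{descs[j % k]}" for j in range(count * k)]
-- ===== Notes on version B (the rewrite author's own statement) =====
-- stated objective: alternative
-- what changed: An exact-name lookup table scanned once replaces most of A's if/elif chain (leaving four ordered substring fallbacks), and the name list is built by one flat loop over the flattened index range(count*k) using j//k and j%k instead of A's nested comprehension over blocks and layer descriptions.
import Mathlib
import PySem

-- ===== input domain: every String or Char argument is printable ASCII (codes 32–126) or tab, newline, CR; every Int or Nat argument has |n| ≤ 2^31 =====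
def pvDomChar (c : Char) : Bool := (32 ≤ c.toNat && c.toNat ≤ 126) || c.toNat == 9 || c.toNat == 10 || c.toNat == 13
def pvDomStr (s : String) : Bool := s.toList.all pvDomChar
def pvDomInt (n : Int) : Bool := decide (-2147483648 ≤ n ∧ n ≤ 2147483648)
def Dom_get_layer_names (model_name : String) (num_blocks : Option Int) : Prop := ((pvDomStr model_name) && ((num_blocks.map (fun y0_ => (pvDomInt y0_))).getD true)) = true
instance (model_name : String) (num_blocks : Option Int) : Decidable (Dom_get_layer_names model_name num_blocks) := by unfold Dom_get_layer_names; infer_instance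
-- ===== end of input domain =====

-- B replaces A's interleaved if/elif chain by an exact-name lookup table followed by four substring
-- fallbacks, and builds the names with ONE flat loop over the flattened index (j // k, j % k)
-- instead of nested loops (objective: alternative; return value only, no speed claim).

-- ===== PORT A =====
-- get_num_blocks: returns `none` exactly where the Python raises KeyError (missing dict key);
-- "susan" yields the passed num_blocks (which is None on the relevant call path).
def get_num_blocks (model_name : String) (num_blocks : Option Int) : Option Int :=
  if PySem.Str.isIn "susan-1" model_name || PySem.Str.isIn "random" model_name then some 1
  else if model_name = "gpt2" then some 12
  else if model_name = "gpt2-medium" then some 24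
  else if model_name = "gpt2-large" then some 32
  else if model_name = "gpt2-xl" then some 48
  else if model_name = "Llama-2-7b-hf" then some 32
  else if model_name = "Llama-2-13b-hf" then some 40
  else if model_name = "susan" then num_blocks
  else if model_name = "susan-simple" then some 1
  else none

def get_layer_names (model_name : String) (num_blocks : Option Int) : List String :=
  let nb : Option Int := match num_blocks with
    | none => get_num_blocks model_name num_blocks
    | some n => some n
  if PySem.Str.isIn "gpt2" model_name then
    match nb with  -- none = Python raises (TypeError/KeyError upstream); excluded by Pre_
    | some n => (PySem.List.pyRange 0 n 1).flatMap (fun block =>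
      ["ln_1", "attn", "ln_2", "mlp"].map (fun d => "transformer.h." ++ PySem.Int.toStr block ++ "." ++ d))
    | none => []
  else if PySem.Str.isIn "Llama-2" model_name || model_name = "susan" then
    match nb with  -- none = Python raises (TypeError/KeyError upstream); excluded by Pre_
    | some n => (PySem.List.pyRange 0 n 1).flatMap (fun i =>
      ["input_layernorm", "self_attn", "post_attention_layernorm", "mlp"].map (fun d => "model.layers." ++ PySem.Int.toStr i ++ "." ++ d))
    | none => []
  else if model_name = "susan-1-ln-attn-p2" then
    (PySem.List.pyRange 0 2 1).flatMap (fun i =>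
      ["input_layernorm", "self_attn", "post_attention_layernorm", "mlp"].map (fun d => "lm_base.layers." ++ PySem.Int.toStr i ++ "." ++ d))
  else if model_name = "susan-simple" || model_name = "susan-1-ln-attn" || model_name = "susan-1-l-attn" || model_name = "susan-1-ln-attn-pos" then
    match nb with
    | some n => (PySem.List.pyRange 0 n 1).flatMap (fun i =>
      ["input_layernorm", "self_attn"].map (fun d => "layers." ++ PySem.Int.toStr i ++ "." ++ d))
    | none => []
  else if model_name = "susan-1-attn" then
    match nb with
    | some n => (PySem.List.pyRange 0 n 1).flatMap (fun i =>
      ["self_attn"].map (fun d => "model.layers." ++ PySem.Int.toStr i ++ "." ++ d))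
    | none => []
  else if model_name = "susan-1-mlp" then
    match nb with
    | some n => (PySem.List.pyRange 0 n 1).flatMap (fun i =>
      ["mlp"].map (fun d => "layers." ++ PySem.Int.toStr i ++ "." ++ d))
    | none => []
  else if model_name = "susan-1-ln-mlp" then
    match nb with
    | some n => (PySem.List.pyRange 0 n 1).flatMap (fun i =>
      ["input_layernorm", "mlp"].map (fun d => "layers." ++ PySem.Int.toStr i ++ "." ++ d))
    | none => []
  else if model_name = "susan-1-ln-attn-ln-mlp" || model_name = "susan-1-pos-ln-attn-ln-mlp" || PySem.Str.isIn "susan-1" model_name then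
    match nb with
    | some n => (PySem.List.pyRange 0 n 1).flatMap (fun i =>
      ["input_layernorm", "self_attn", "post_attention_layernorm", "mlp"].map (fun d => "layers." ++ PySem.Int.toStr i ++ "." ++ d))
    | none => []
  else if PySem.Str.isIn "random" model_name then
    ["linear"]
  else
    []  -- Python raises ValueError here; excluded by Pre_

-- ===== PORT B =====
def LN4 : List String := ["input_layernorm", "self_attn", "post_attention_layernorm", "mlp"]

-- exact-name table: model name -> (prefix, layer descs, fixed count or none for num_blocks)
def exactTable : PySem.Dict String (String × List String × Option Int) :=
  PySem.Dict.mk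
  [ ("susan", ("model.layers.", LN4, none)),
    ("susan-1-ln-attn-p2", ("lm_base.layers.", LN4, some 2)),
    ("susan-simple", ("layers.", ["input_layernorm", "self_attn"], none)),
    ("susan-1-ln-attn", ("layers.", ["input_layernorm", "self_attn"], none)),
    ("susan-1-l-attn", ("layers.", ["input_layernorm", "self_attn"], none)),
    ("susan-1-ln-attn-pos", ("layers.", ["input_layernorm", "self_attn"], none)),
    ("susan-1-attn", ("model.layers.", ["self_attn"], none)),
    ("susan-1-mlp", ("layers.", ["mlp"], none)),
    ("susan-1-ln-mlp", ("layers.", ["input_layernorm", "mlp"], none)),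
    ("susan-1-ln-attn-ln-mlp", ("layers.", LN4, none)),
    ("susan-1-pos-ln-attn-ln-mlp", ("layers.", LN4, none)) ]

-- [f"{prefix}{j // k}.{descs[j % k]}" for j in range(count * k)];
-- count = none means the Python raises (None * int → TypeError), excluded by Pre_
def buildFlat (pre : String) (count : Option Int) (descs : List String) : List String :=
  match count with
  | none => []
  | some n =>
    (PySem.List.pyRange 0 (n * descs.length) 1).map (fun j =>
      pre ++ PySem.Int.toStr (PySem.Int.floordiv j descs.length) ++ "." ++
        PySem.List.pyGetD descs (PySem.Int.mod j descs.length) "")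

def get_layer_names_alt (model_name : String) (num_blocks : Option Int) : List String :=
  let nb : Option Int := match num_blocks with
    | none => get_num_blocks model_name num_blocks
    | some n => some n
  -- `if count is None: count = num_blocks`
  let resolve : Option Int → Option Int := fun c => match c with | some c => some c | none => nb
  match PySem.Dict.get? exactTable model_name with
  | some (pre, descs, cnt) => buildFlat pre (resolve cnt) descs
  | none =>
    if PySem.Str.isIn "gpt2" model_name then
      buildFlat "transformer.h." (resolve none) ["ln_1", "attn", "ln_2", "mlp"]
    else if PySem.Str.isIn "Llama-2" model_name then
      buildFlat "model.layers." (resolve none) LN4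
    else if PySem.Str.isIn "susan-1" model_name then
      buildFlat "layers." (resolve none) LN4
    else if PySem.Str.isIn "random" model_name then
      ["linear"]
    else
      []  -- Python raises ValueError here; excluded by Pre_

-- ===== PRECONDITION & SPEC =====
-- Pre_ excludes exactly the inputs on which the Python A raises: model names matching no branch
-- (ValueError), and num_blocks = None with a name whose block count is not resolvable
-- (KeyError in get_num_blocks, or "susan" whose resolved count is None → TypeError in range).
def Pre_get_layer_names (model_name : String) (num_blocks : Option Int) : Prop :=
  (PySem.Str.isIn "gpt2" model_name = true ∨ PySem.Str.isIn "Llama-2" model_name = true ∨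
   model_name = "susan" ∨ model_name = "susan-simple" ∨
   PySem.Str.isIn "susan-1" model_name = true ∨ PySem.Str.isIn "random" model_name = true) ∧
  (num_blocks = none →
    (PySem.Str.isIn "susan-1" model_name = true ∨ PySem.Str.isIn "random" model_name = true ∨
     model_name = "gpt2" ∨ model_name = "gpt2-medium" ∨ model_name = "gpt2-large" ∨
     model_name = "gpt2-xl" ∨ model_name = "Llama-2-7b-hf" ∨ model_name = "Llama-2-13b-hf" ∨
     model_name = "susan-simple"))
instance (model_name : String) (num_blocks : Option Int) : Decidable (Pre_get_layer_names model_name num_blocks) := by unfold Pre_get_layer_names; infer_instance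

def pvWitness_get_layer_names : String × Option Int := ("gpt2", none)

def Spec_get_layer_names (model_name : String) (num_blocks : Option Int) (out : List String) : Prop := out = get_layer_names_alt model_name num_blocks
instance (model_name : String) (num_blocks : Option Int) (out : List String) : Decidable (Spec_get_layer_names model_name num_blocks out) := by unfold Spec_get_layer_names; infer_instance

-- ===== CLAIM (what is proved, stated in full; the proofs are below) =====
def Claim_equal_get_layer_names : Prop := ∀ (model_name : String) (num_blocks : Option Int), Dom_get_layer_names model_name num_blocks → Pre_get_layer_names model_name num_blocks → Spec_get_layer_names model_name num_blocks (get_layer_names model_name num_blocks)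

-- ===== LEMMAS AND PROOFS =====
-- mapping over the index range of a list is mapping over the list
theorem map_getD_range (xs : List String) (f : String → String) :
    (List.range xs.length).map (fun r => f (xs.getD r "")) = xs.map f := by
  induction xs with
  | nil => rfl
  | cons a xs ih =>
    simp only [List.length_cons, List.range_succ_eq_map, List.map_cons, List.map_map]
    exact congrArg (f a :: ·) ih

-- Nat core of the flattened-index equation
theorem flat_nat (pre : String) (descs : List String) (hk : 0 < descs.length) (m : Nat) :
    (List.range (m * descs.length)).map (fun (j : Nat) =>
        pre ++ PySem.Int.toStr (PySem.Int.floordiv (j : Int) descs.length) ++ "." ++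
          PySem.List.pyGetD descs (PySem.Int.mod (j : Int) descs.length) "") =
    (List.range m).flatMap (fun (b : Nat) =>
        descs.map (fun d => pre ++ PySem.Int.toStr (b : Int) ++ "." ++ d)) := by
  induction m with
  | zero => simp
  | succ m ih =>
    rw [Nat.succ_mul, List.range_add, List.map_append, List.range_succ, List.flatMap_append, ih,
      List.map_map]
    simp only [List.flatMap_cons, List.flatMap_nil, List.append_nil]
    refine congrArg _ ?_
    rw [← map_getD_range descs (fun d => pre ++ PySem.Int.toStr (m : Int) ++ "." ++ d)]
    refine List.map_congr_left (fun r hr => ?_)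
    have hrk : r < descs.length := List.mem_range.mp hr
    show pre ++ PySem.Int.toStr (PySem.Int.floordiv ((m * descs.length + r : Nat) : Int) descs.length) ++ "." ++
        PySem.List.pyGetD descs (PySem.Int.mod ((m * descs.length + r : Nat) : Int) descs.length) "" = _
    rw [PySem.Int.floordiv_natCast, PySem.Int.mod_natCast, PySem.List.pyGetD_natCast]
    have hd : (m * descs.length + r) / descs.length = m := by
      rw [mul_comm, Nat.mul_add_div hk, Nat.div_eq_of_lt hrk]; omega
    have hm : (m * descs.length + r) % descs.length = r := by
      rw [mul_comm, Nat.mul_add_mod]; exact Nat.mod_eq_of_lt hrk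
    rw [hd, hm]

-- Int form: A's nested comprehension equals B's flat loop
theorem flat_int (pre : String) (descs : List String) (hk : 0 < descs.length) (n : Int) :
    (PySem.List.pyRange 0 n 1).flatMap (fun i =>
        descs.map (fun d => pre ++ PySem.Int.toStr i ++ "." ++ d)) =
    buildFlat pre (some n) descs := by
  simp only [buildFlat]
  by_cases h : n ≤ 0
  · have h2 : n * (descs.length : Int) ≤ 0 :=
      mul_nonpos_of_nonpos_of_nonneg h (by positivity)
    rw [PySem.List.pyRange_one_eq_nil h, PySem.List.pyRange_one_eq_nil h2]
    rfl
  · obtain ⟨m, rfl⟩ : ∃ m : Nat, n = (m : Int) := ⟨n.toNat, by omega⟩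
    have hcast : (m : Int) * (descs.length : Int) = ((m * descs.length : Nat) : Int) := by push_cast; ring
    rw [hcast, PySem.List.pyRange_zero_natCast, PySem.List.pyRange_zero_natCast,
      List.map_map, List.flatMap_map]
    simp only [Function.comp_def]
    exact (flat_nat pre descs hk m).symm

set_option maxHeartbeats 4000000 in
theorem ports_agree (model_name : String) (num_blocks : Option Int) :
    get_layer_names model_name num_blocks = get_layer_names_alt model_name num_blocks := by
  by_cases h1 : model_name = "susan"
  · subst h1
    cases num_blocks with
    | none => decide
    | some n => exact flat_int "model.layers." ["input_layernorm", "self_attn", "post_attention_layernorm", "mlp"] (by decide) n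
  by_cases h2 : model_name = "susan-1-ln-attn-p2"
  · subst h2
    cases num_blocks with
    | none => decide
    | some n => exact flat_int "lm_base.layers." ["input_layernorm", "self_attn", "post_attention_layernorm", "mlp"] (by decide) 2
  by_cases h3 : model_name = "susan-simple"
  · subst h3
    cases num_blocks with
    | none => decide
    | some n => exact flat_int "layers." ["input_layernorm", "self_attn"] (by decide) n
  by_cases h4 : model_name = "susan-1-ln-attn"
  · subst h4
    cases num_blocks with
    | none => decide
    | some n => exact flat_int "layers." ["input_layernorm", "self_attn"] (by decide) n
  by_cases h5 : model_name = "susan-1-l-attn"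
  · subst h5
    cases num_blocks with
    | none => decide
    | some n => exact flat_int "layers." ["input_layernorm", "self_attn"] (by decide) n
  by_cases h6 : model_name = "susan-1-ln-attn-pos"
  · subst h6
    cases num_blocks with
    | none => decide
    | some n => exact flat_int "layers." ["input_layernorm", "self_attn"] (by decide) n
  by_cases h7 : model_name = "susan-1-attn"
  · subst h7
    cases num_blocks with
    | none => decide
    | some n => exact flat_int "model.layers." ["self_attn"] (by decide) n
  by_cases h8 : model_name = "susan-1-mlp"
  · subst h8
    cases num_blocks with
    | none => decide
    | some n => exact flat_int "layers." ["mlp"] (by decide) n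
  by_cases h9 : model_name = "susan-1-ln-mlp"
  · subst h9
    cases num_blocks with
    | none => decide
    | some n => exact flat_int "layers." ["input_layernorm", "mlp"] (by decide) n
  by_cases h10 : model_name = "susan-1-ln-attn-ln-mlp"
  · subst h10
    cases num_blocks with
    | none => decide
    | some n => exact flat_int "layers." ["input_layernorm", "self_attn", "post_attention_layernorm", "mlp"] (by decide) n
  by_cases h11 : model_name = "susan-1-pos-ln-attn-ln-mlp"
  · subst h11
    cases num_blocks with
    | none => decide
    | some n => exact flat_int "layers." ["input_layernorm", "self_attn", "post_attention_layernorm", "mlp"] (by decide) n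
  have hg : PySem.Dict.get? exactTable model_name = none := by
    simp [exactTable, PySem.Dict.get?, Ne.symm h1, Ne.symm h2, Ne.symm h3, Ne.symm h4, Ne.symm h5, Ne.symm h6, Ne.symm h7, Ne.symm h8, Ne.symm h9, Ne.symm h10, Ne.symm h11]
  unfold get_layer_names get_layer_names_alt
  rw [hg]
  simp only [h1, h2, h3, h4, h5, h6, h7, h8, h9, h10, h11, decide_false, Bool.false_or, Bool.or_false, if_false, LN4]
  by_cases hgpt : PySem.Str.isIn "gpt2" model_name = true
  · simp only [hgpt, if_true]
    cases hnb : (match num_blocks with | none => get_num_blocks model_name num_blocks | some n => some n) with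
    | none => rfl
    | some n => exact flat_int "transformer.h." ["ln_1", "attn", "ln_2", "mlp"] (by decide) n
  · simp only [hgpt]
    by_cases hll : PySem.Str.isIn "Llama-2" model_name = true
    · simp only [hll, if_true]
      cases hnb : (match num_blocks with | none => get_num_blocks model_name num_blocks | some n => some n) with
      | none => rfl
      | some n => exact flat_int "model.layers." ["input_layernorm", "self_attn", "post_attention_layernorm", "mlp"] (by decide) n
    · simp only [hll]
      by_cases hs1 : PySem.Str.isIn "susan-1" model_name = true
      · simp only [hs1, if_true]
        cases hnb : (match num_blocks with | none => get_num_blocks model_name num_blocks | some n => some n) with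
        | none => rfl
        | some n => exact flat_int "layers." ["input_layernorm", "self_attn", "post_attention_layernorm", "mlp"] (by decide) n
      · simp only [hs1]
        rfl

-- ===== VERDICT (by name: the statement is the Claim_ definition above) =====
theorem get_layer_names_spec : Claim_equal_get_layer_names := by
  intro m nb _ _
  unfold Spec_get_layer_names
  exact ports_agree m nb
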